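-- pv_equiv track=rewrite | github.com/diegoaberrio/transcriptor_app | exporter.py | generar_documento_calendario
-- ===== SOURCE A (Python) =====
-- def generar_documento_calendario(instrucciones, num_sprints, total_days):
--     """
--     Genera un documento estilo calendario que distribuye las instrucciones entre sprints,
--     asignando a cada sprint una cantidad de días basada en el total indicado.
--
--     Parámetros:
--       instrucciones (list): Lista de instrucciones extraídas.
--       num_sprints (int): Número de sprints en los que se dividirán las instrucciones.
--       total_days (int): Número total de días disponibles para realizar el trabajo.
--
--     Retorna:
--       str: Documento formateado en estilo calendario con sprints y días asignados.
--     """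
--     if num_sprints < 1:
--         num_sprints = 1
--     total = len(instrucciones)
--     if total == 0:
--         return "No hay instrucciones para generar el documento calendario."
--
--     # Distribuir las instrucciones entre los sprints (similar a generar_documento_scrum)
--     sprint_size = total // num_sprints
--     remainder = total % num_sprints
--
--     sprints = {}
--     start = 0
--     for i in range(num_sprints):
--         extra = 1 if i < remainder else 0
--         end = start + sprint_size + extra
--         sprints[f"Sprint {i+1}"] = instrucciones[start:end]
--         start = end
--
--     # Distribuir los días entre los sprints
--     days_per_sprint = total_days // num_sprints
--     days_remainder = total_days % num_sprints
--
--     calendario = ""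
--     for i, (sprint, tasks) in enumerate(sprints.items()):
--         extra_day = 1 if i < days_remainder else 0
--         sprint_days = days_per_sprint + extra_day
--         calendario += f"{sprint} - Duración: {sprint_days} día(s)\n"
--         for task in tasks:
--             calendario += f"  - {task}\n"
--         calendario += "\n"
--     return calendario
-- ===== SOURCE B (Python) =====
-- def generar_documento_calendario(instrucciones, num_sprints, total_days):
--     if num_sprints < 1:
--         num_sprints = 1
--     if not instrucciones:
--         return "No hay instrucciones para generar el documento calendario."
--     # Greedy self-similar distribution: each sprint takes the ceiling of
--     # remaining/sprints_left, both for tasks and for days; no quotient or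
--     # remainder is ever precomputed.
--     parts = []
--     pos = 0
--     days_left = total_days
--     s = num_sprints
--     while s > 0:
--         take = -((pos - len(instrucciones)) // s)   # ceil of remaining tasks / s
--         days = -(-days_left // s)                   # ceil of remaining days / s
--         parts.append(f"Sprint {num_sprints - s + 1} - Duración: {days} día(s)\n")
--         for t in instrucciones[pos:pos + take]:
--             parts.append(f"  - {t}\n")
--         parts.append("\n")
--         pos += take
--         days_left -= days
--         s -= 1
--     return "".join(parts)
-- ===== Notes on version B (the rewrite author's own statement) =====
-- stated objective: alternative
-- what changed: Replaces A's precomputed quotient/remainder distribution (dict of chunks built with per-index extra-1 flags, then a second formatting pass) by a greedy self-similar peeling loop: each iteration gives the current sprint the ceiling of remaining-tasks/sprints-left and remaining-days/sprints-left, consumes them, and continues on the shrunk problem; no remainder or per-index extra logic exists and the two passes collapse into one.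
import Mathlib
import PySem

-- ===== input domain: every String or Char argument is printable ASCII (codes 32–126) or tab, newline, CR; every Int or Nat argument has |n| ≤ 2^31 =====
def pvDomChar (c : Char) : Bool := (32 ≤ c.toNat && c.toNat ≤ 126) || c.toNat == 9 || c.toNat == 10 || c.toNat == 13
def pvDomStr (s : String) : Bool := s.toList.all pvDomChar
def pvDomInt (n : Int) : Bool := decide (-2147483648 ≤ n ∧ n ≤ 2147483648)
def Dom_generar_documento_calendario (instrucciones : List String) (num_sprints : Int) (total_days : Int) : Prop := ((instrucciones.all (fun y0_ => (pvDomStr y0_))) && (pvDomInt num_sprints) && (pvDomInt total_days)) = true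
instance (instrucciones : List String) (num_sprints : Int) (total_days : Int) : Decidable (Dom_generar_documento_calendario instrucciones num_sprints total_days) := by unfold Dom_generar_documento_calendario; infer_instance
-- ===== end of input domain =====

-- B replaces A's precomputed quotient/remainder chunking (dict + two passes) by a single greedy
-- peeling loop: each sprint takes the ceiling of remaining/sprints-left (objective: alternative).

-- ===== PORT A =====
def generar_documento_calendario (instrucciones : List String) (num_sprints : Int) (total_days : Int) : String :=
  let num_sprints := if num_sprints < 1 then 1 else num_sprints
  let total : Int := PySem.List.len instrucciones
  if total = 0 then "No hay instrucciones para generar el documento calendario."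
  else
    let sprint_size := PySem.Int.floordiv total num_sprints
    let remainder := PySem.Int.mod total num_sprints
    let st := (PySem.List.pyRange 0 num_sprints 1).foldl
      (fun (st : PySem.Dict String (List String) × Int) i =>
        let extra : Int := if i < remainder then 1 else 0
        let e := st.2 + sprint_size + extra
        (st.1.insert ("Sprint " ++ PySem.Int.toStr (i + 1))
          (PySem.List.slice instrucciones (some st.2) (some e)), e))
      (PySem.Dict.empty, 0)
    let sprints := st.1
    let days_per_sprint := PySem.Int.floordiv total_days num_sprints
    let days_remainder := PySem.Int.mod total_days num_sprints
    (PySem.List.enumerate sprints.items 0).foldl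
      (fun (calendario : String) p =>
        let extra_day : Int := if p.1 < days_remainder then 1 else 0
        let sprint_days := days_per_sprint + extra_day
        let calendario := calendario ++
          (p.2.1 ++ " - Duración: " ++ PySem.Int.toStr sprint_days ++ " día(s)\n")
        let calendario := p.2.2.foldl (fun c task => c ++ ("  - " ++ task ++ "\n")) calendario
        calendario ++ "\n")
      ""

-- ===== PORT B =====
-- the 'while s > 0' loop of Source B as a tail recursion over the same state
def pvWhileB (xs : List String) (ns : Int) (parts : List String) (pos days_left s : Int) : List String :=
  if _h : 0 < s then
    let take := -(PySem.Int.floordiv (pos - PySem.List.len xs) s)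
    let days := -(PySem.Int.floordiv (-days_left) s)
    let parts := parts ++
      ["Sprint " ++ PySem.Int.toStr (ns - s + 1) ++ " - Duración: " ++ PySem.Int.toStr days ++ " día(s)\n"]
    let parts := (PySem.List.slice xs (some pos) (some (pos + take))).foldl
      (fun ps t => ps ++ ["  - " ++ t ++ "\n"]) parts
    pvWhileB xs ns (parts ++ ["\n"]) (pos + take) (days_left - days) (s - 1)
  else parts
termination_by s.toNat
decreasing_by omega

def generar_documento_calendario_alt (instrucciones : List String) (num_sprints : Int) (total_days : Int) : String :=
  let num_sprints := if num_sprints < 1 then 1 else num_sprints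
  if instrucciones = [] then "No hay instrucciones para generar el documento calendario."
  else
    PySem.Str.join "" (pvWhileB instrucciones num_sprints [] 0 total_days num_sprints)

-- ===== PRECONDITION & SPEC =====
def Spec_generar_documento_calendario (instrucciones : List String) (num_sprints : Int) (total_days : Int) (out : String) : Prop := out = generar_documento_calendario_alt instrucciones num_sprints total_days
instance (instrucciones : List String) (num_sprints : Int) (total_days : Int) (out : String) : Decidable (Spec_generar_documento_calendario instrucciones num_sprints total_days out) := by unfold Spec_generar_documento_calendario; infer_instance

-- ===== CLAIM (what is proved, stated in full; the proofs are below) =====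
def Claim_equal_generar_documento_calendario : Prop := ∀ (instrucciones : List String) (num_sprints : Int) (total_days : Int), Dom_generar_documento_calendario instrucciones num_sprints total_days → Spec_generar_documento_calendario instrucciones num_sprints total_days (generar_documento_calendario instrucciones num_sprints total_days)

-- ===== LEMMAS AND PROOFS =====

/-! ### decimal representation: `Nat.toDigits 10` is injective -/

def pvRep (n : Nat) : List Char :=
  if _h : n < 10 then [Nat.digitChar n]
  else pvRep (n / 10) ++ [Nat.digitChar (n % 10)]
decreasing_by exact Nat.div_lt_self (by omega) (by omega)

theorem pvToDigitsCore_eq : ∀ (f n : Nat) (l : List Char), n < f →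
    Nat.toDigitsCore 10 f n l = pvRep n ++ l := by
  intro f
  induction f with
  | zero => intro n l h; omega
  | succ f ih =>
    intro n l h
    by_cases h10 : n < 10
    · have hdiv : n / 10 = 0 := Nat.div_eq_of_lt h10
      have hmod : n % 10 = n := Nat.mod_eq_of_lt h10
      simp [Nat.toDigitsCore, hdiv, hmod, pvRep, h10]
    · have hdiv : n / 10 ≠ 0 := by omega
      have hlt : n / 10 < f := by
        have := Nat.div_lt_self (by omega : 0 < n) (by omega : 1 < 10)
        omega
      rw [show Nat.toDigitsCore 10 (f + 1) n l
            = Nat.toDigitsCore 10 f (n / 10) (Nat.digitChar (n % 10) :: l) by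
          simp [Nat.toDigitsCore, hdiv]]
      rw [ih _ _ hlt]
      conv_rhs => rw [pvRep]
      rw [dif_neg h10]
      simp [List.append_assoc]

theorem pvToDigits_eq (n : Nat) : Nat.toDigits 10 n = pvRep n := by
  have := pvToDigitsCore_eq (n + 1) n [] (by omega)
  simpa [Nat.toDigits] using this

theorem pvDigitChar_toNat {d : Nat} (h : d < 10) : (Nat.digitChar d).toNat = d + 48 := by
  interval_cases d <;> rfl

theorem pvRep_val : ∀ (n : Nat) (a : Nat),
    (pvRep n).foldl (fun a c => 10 * a + (c.toNat - 48)) a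
      = a * 10 ^ (pvRep n).length + n := by
  intro n
  induction n using Nat.strong_induction_on with
  | _ n ih =>
    intro a
    by_cases h10 : n < 10
    · rw [pvRep]; simp [h10, List.foldl, pvDigitChar_toNat h10]; ring
    · rw [pvRep]; simp only [h10, dif_neg, not_false_iff]
      rw [List.foldl_append]
      have hlt : n / 10 < n := Nat.div_lt_self (by omega) (by omega)
      rw [ih _ hlt a]
      have hm : (Nat.digitChar (n % 10)).toNat = n % 10 + 48 :=
        pvDigitChar_toNat (Nat.mod_lt _ (by omega))
      simp [List.foldl, hm, List.length_append, pow_succ]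
      have : 10 * (n / 10) + n % 10 = n := Nat.div_add_mod n 10
      ring_nf
      omega

theorem pvRep_inj {m n : Nat} (h : pvRep m = pvRep n) : m = n := by
  have hm := pvRep_val m 0
  have hn := pvRep_val n 0
  rw [h] at hm
  simp at hm hn
  omega

theorem pvToStr_inj_pos {x y : Int} (hx : 0 < x) (hy : 0 < y)
    (h : PySem.Int.toStr x = PySem.Int.toStr y) : x = y := by
  have h' := congrArg String.toList h
  simp only [PySem.Int.toStr, String.toList_ofList] at h'
  simp only [PySem.Int.toChars, if_neg (by omega : ¬ x < 0), if_neg (by omega : ¬ y < 0)] at h'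
  rw [pvToDigits_eq, pvToDigits_eq] at h'
  have := pvRep_inj h'
  omega

/-- the sprint key of sprint `k` (0-based) -/
def pvKey (k : Nat) : String := "Sprint " ++ PySem.Int.toStr ((k : Int) + 1)

theorem pvKey_inj {j k : Nat} (h : pvKey j = pvKey k) : j = k := by
  unfold pvKey at h
  have h' := congrArg String.toList h
  rw [String.toList_append, String.toList_append] at h'
  have h2 := List.append_cancel_left h'
  have h3 : PySem.Int.toStr ((j : Int) + 1) = PySem.Int.toStr ((k : Int) + 1) :=
    String.toList_inj.mp h2
  have := pvToStr_inj_pos (by omega) (by omega) h3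
  omega

/-! ### string concatenation helpers -/

def pvConcat (l : List String) : String := l.foldl (· ++ ·) ""

theorem pvFoldl_append_str : ∀ (l : List String) (c : String),
    l.foldl (· ++ ·) c = c ++ pvConcat l := by
  intro l
  induction l with
  | nil => intro c; simp [pvConcat]
  | cons a l ih =>
    intro c
    simp only [pvConcat, List.foldl]
    rw [ih ("" ++ a), ih (c ++ a), String.empty_append, String.append_assoc]

theorem pvConcat_cons (a : String) (l : List String) :
    pvConcat (a :: l) = a ++ pvConcat l := by
  simp only [pvConcat, List.foldl]
  rw [pvFoldl_append_str l ("" ++ a), String.empty_append]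
  rfl

theorem pvConcat_append : ∀ (l l' : List String),
    pvConcat (l ++ l') = pvConcat l ++ pvConcat l' := by
  intro l l'
  induction l with
  | nil => simp [pvConcat, String.empty_append]
  | cons a l ih =>
    simp only [List.cons_append, pvConcat_cons, ih, String.append_assoc]

theorem pvFoldl_map_str {α : Type} (f : α → String) : ∀ (l : List α) (c : String),
    l.foldl (fun c t => c ++ f t) c = c ++ pvConcat (l.map f) := by
  intro l
  induction l with
  | nil => intro c; simp [pvConcat]
  | cons a l ih =>
    intro c
    simp only [List.foldl, List.map]
    rw [ih, pvConcat_cons, String.append_assoc]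

/-! ### toList forms of concatenation and join -/

theorem pvConcat_nil : pvConcat [] = "" := rfl

theorem pvToList_concat : ∀ (l : List String),
    (pvConcat l).toList = (l.map String.toList).flatten := by
  intro l
  induction l with
  | nil => simp [pvConcat]
  | cons a l ih => simp [pvConcat_cons, String.toList_append, ih]

theorem pvIntercalate_nil : ∀ (ps : List (List Char)), List.intercalate [] ps = ps.flatten
  | [] => by simp [List.intercalate]
  | [a] => by simp [List.intercalate]
  | a :: b :: t => by
      have ih := pvIntercalate_nil (b :: t)
      simp only [List.intercalate] at ih ⊢
      simp [List.intersperse_cons₂] at ih ⊢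
      simp [ih]

theorem pvJoin_empty (parts : List String) : PySem.Str.join "" parts = pvConcat parts := by
  apply String.toList_inj.mp
  simp only [PySem.Str.join, String.toList_ofList, PySem.Chars.join]
  rw [pvToList_concat]
  have h0 : ("" : String).toList = [] := rfl
  rw [h0, pvIntercalate_nil]

/-! ### the per-sprint canonical pieces -/

def pvChunk (xs : List String) (q r : Int) (k : Nat) : List String :=
  PySem.List.slice xs (some ((k : Int) * q + min (k : Int) r))
    (some ((k : Int) * q + min (k : Int) r + q + (if (k : Int) < r then 1 else 0)))

def pvLine (xs : List String) (q r dq dr : Int) (k : Nat) : String :=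
  (pvKey k ++ " - Duración: " ++
      PySem.Int.toStr (dq + (if (k : Int) < dr then 1 else 0)) ++ " día(s)\n")
    ++ pvConcat ((pvChunk xs q r k).map (fun task => "  - " ++ task ++ "\n")) ++ "\n"

theorem pvStart_succ {q r : Int} (k : Nat) :
    ((k : Int) + 1) * q + min ((k : Int) + 1) r
      = (k : Int) * q + min (k : Int) r + q + (if (k : Int) < r then 1 else 0) := by
  have hq : ((k : Int) + 1) * q = (k : Int) * q + q := by ring
  rw [hq]
  generalize (k : Int) * q = s
  simp only [Int.min_def]
  split_ifs <;> omega

/-! ### loop A, first pass: the dict's items in closed form -/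

theorem pvLoopA1 (xs : List String) (q r : Int) (hr : 0 ≤ r) : ∀ (m : Nat),
    ((List.map (fun (k : Nat) => (k : Int)) (List.range m)).foldl
      (fun (st : PySem.Dict String (List String) × Int) i =>
        (st.1.insert ("Sprint " ++ PySem.Int.toStr (i + 1))
          (PySem.List.slice xs (some st.2) (some (st.2 + q + (if i < r then 1 else 0)))),
         st.2 + q + (if i < r then 1 else 0)))
      (PySem.Dict.empty, 0))
    = (PySem.Dict.mk ((List.range m).map (fun k => (pvKey k, pvChunk xs q r k))),
       (m : Int) * q + min (m : Int) r) := by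
  intro m
  induction m with
  | zero =>
    simp only [List.range_zero, List.map_nil, List.foldl_nil, Nat.cast_zero, zero_mul, zero_add]
    rw [min_eq_left hr]
    rfl
  | succ m ih =>
    rw [List.range_succ, List.map_append, List.foldl_append, ih]
    simp only [List.map_cons, List.map_nil, List.foldl_cons, List.foldl_nil]
    have hfresh : (PySem.Dict.mk ((List.range m).map
        (fun k => (pvKey k, pvChunk xs q r k)))).contains (pvKey m) = false := by
      rw [PySem.Dict.contains_eq_decide_mem_keys]
      simp only [PySem.Dict.keys_mk, List.map_map, decide_eq_false_iff_not, List.mem_map,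
        Function.comp_apply]
      rintro ⟨j, hj, hpk⟩
      have hjm := pvKey_inj hpk
      have := List.mem_range.mp hj
      omega
    have hins := PySem.Dict.items_insert_of_not_contains
      (PySem.Dict.mk ((List.range m).map (fun k => (pvKey k, pvChunk xs q r k))))
      (PySem.List.slice xs (some ((m : Int) * q + min (m : Int) r))
        (some ((m : Int) * q + min (m : Int) r + q + (if (m : Int) < r then 1 else 0)))) hfresh
    simp only [Prod.mk.injEq]
    constructor
    · apply PySem.Dict.ext
      rw [show ("Sprint " ++ PySem.Int.toStr ((m : Int) + 1)) = pvKey m from rfl]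
      rw [hins]
      simp only [List.map_append, List.map_cons, List.map_nil]
      rfl
    · push_cast
      rw [pvStart_succ m]

/-! ### loop A, second pass -/

theorem pvLoopA2 (xs : List String) (q r dq dr : Int) : ∀ (m : Nat) (c : String),
    (PySem.List.enumerate ((List.range m).map (fun k => (pvKey k, pvChunk xs q r k))) 0).foldl
      (fun (calendario : String) p =>
        (p.2.2.foldl (fun c task => c ++ ("  - " ++ task ++ "\n"))
          (calendario ++ (p.2.1 ++ " - Duración: " ++
            PySem.Int.toStr (dq + (if p.1 < dr then 1 else 0)) ++ " día(s)\n"))) ++ "\n")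
      c
    = c ++ pvConcat ((List.range m).map (pvLine xs q r dq dr)) := by
  intro m
  induction m with
  | zero =>
    intro c
    simp [PySem.List.enumerate_nil, pvConcat, String.append_empty]
  | succ m ih =>
    intro c
    rw [List.range_succ, List.map_append, PySem.List.enumerate_append, List.foldl_append, ih]
    simp only [List.map_cons, List.map_nil, PySem.List.enumerate_cons, PySem.List.enumerate_nil,
      List.foldl_cons, List.foldl_nil, List.length_map, List.length_range, zero_add]
    rw [List.map_append, pvConcat_append]
    simp only [List.map_cons, List.map_nil]
    rw [pvFoldl_map_str (fun task => "  - " ++ task ++ "\n")]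
    simp [pvLine, pvConcat_cons, pvConcat_nil, String.append_empty, String.append_assoc]

/-! ### loop B: ceiling-peeling invariant -/

/-- ceiling division extracts one balanced share: `ceil((q*b+c)/b) = q + [c > 0]` for `0 ≤ c ≤ b`. -/
theorem pvCeil_eq (a b q c : Int) (hb : 0 < b) (hc0 : 0 ≤ c) (hcb : c ≤ b) (ha : a = q * b + c) :
    -(PySem.Int.floordiv (-a) b) = q + (if 0 < c then 1 else 0) := by
  rw [PySem.Int.neg_floordiv_neg_eq_iff_of_pos hb]
  split_ifs with h
  · constructor <;> nlinarith
  · constructor <;> nlinarith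

theorem pvLoopB (xs : List String) (ns q r dq dr td : Int)
    (hn : PySem.List.len xs = q * ns + r) (_hr0 : 0 ≤ r) (hr1 : r < ns)
    (htd : td = dq * ns + dr) (_hdr0 : 0 ≤ dr) (hdr1 : dr < ns) :
    ∀ (s k : Nat), (k : Int) + (s : Int) = ns → ∀ (parts : List String),
    pvWhileB xs ns parts ((k : Int) * q + min (k : Int) r)
        (td - ((k : Int) * dq + min (k : Int) dr)) (s : Int)
    = parts ++ (List.range' k s).flatMap
        (fun (t : Nat) => ("Sprint " ++ PySem.Int.toStr ((t : Int) + 1) ++ " - Duración: " ++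
            PySem.Int.toStr (dq + (if (t : Int) < dr then 1 else 0)) ++ " día(s)\n")
          :: ((pvChunk xs q r t).map (fun task => "  - " ++ task ++ "\n") ++ ["\n"])) := by
  intro s
  induction s with
  | zero =>
    intro k hks parts
    rw [pvWhileB]
    simp
  | succ s ih =>
    intro k hks parts
    have hspos : (0 : Int) < ((s + 1 : Nat) : Int) := by push_cast; omega
    rw [pvWhileB, dif_pos hspos]
    have hks' : (k : Int) + ((s : Int) + 1) = ns := by push_cast at hks ⊢; omega
    -- the two ceiling shares
    have htake : -(PySem.Int.floordiv (((k : Int) * q + min (k : Int) r) - PySem.List.len xs)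
        ((s + 1 : Nat) : Int)) = q + (if (k : Int) < r then 1 else 0) := by
      rw [show ((k : Int) * q + min (k : Int) r) - PySem.List.len xs
            = -(PySem.List.len xs - ((k : Int) * q + min (k : Int) r)) by ring]
      have ha : PySem.List.len xs - ((k : Int) * q + min (k : Int) r)
          = q * ((s + 1 : Nat) : Int) + (r - min (k : Int) r) := by
        rw [hn]; push_cast; linear_combination (-q) * hks'
      have hiff : (0 : Int) < r - min (k : Int) r ↔ (k : Int) < r := by
        rcases le_total (k : Int) r with h | h
        · rw [min_eq_left h]; omega
        · rw [min_eq_right h]; omega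
      rw [pvCeil_eq _ _ q (r - min (k : Int) r) (by push_cast; omega)
        (by rcases le_total (k : Int) r with h | h
            · rw [min_eq_left h]; omega
            · rw [min_eq_right h]; omega)
        (by rcases le_total (k : Int) r with h | h
            · rw [min_eq_left h]; push_cast; omega
            · rw [min_eq_right h]; push_cast; omega) ha]
      rw [if_congr hiff rfl rfl]
    have hdays : -(PySem.Int.floordiv (-(td - ((k : Int) * dq + min (k : Int) dr)))
        ((s + 1 : Nat) : Int)) = dq + (if (k : Int) < dr then 1 else 0) := by
      have ha : td - ((k : Int) * dq + min (k : Int) dr)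
          = dq * ((s + 1 : Nat) : Int) + (dr - min (k : Int) dr) := by
        rw [htd]; push_cast; linear_combination (-dq) * hks'
      have hiff : (0 : Int) < dr - min (k : Int) dr ↔ (k : Int) < dr := by
        rcases le_total (k : Int) dr with h | h
        · rw [min_eq_left h]; omega
        · rw [min_eq_right h]; omega
      rw [pvCeil_eq _ _ dq (dr - min (k : Int) dr) (by push_cast; omega)
        (by rcases le_total (k : Int) dr with h | h
            · rw [min_eq_left h]; omega
            · rw [min_eq_right h]; omega)
        (by rcases le_total (k : Int) dr with h | h
            · rw [min_eq_left h]; push_cast; omega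
            · rw [min_eq_right h]; push_cast; omega) ha]
      rw [if_congr hiff rfl rfl]
    simp only [htake, hdays]
    have hhdr : ns - ((s + 1 : Nat) : Int) + 1 = (k : Int) + 1 := by push_cast; omega
    rw [hhdr]
    rw [PySem.List.foldl_append_singleton_eq_map (fun task => "  - " ++ task ++ "\n")]
    have hnewpos : (k : Int) * q + min (k : Int) r + (q + (if (k : Int) < r then 1 else 0))
        = ((k + 1 : Nat) : Int) * q + min ((k + 1 : Nat) : Int) r := by
      push_cast; rw [pvStart_succ k]; ring
    have hnewdays : td - ((k : Int) * dq + min (k : Int) dr)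
          - (dq + (if (k : Int) < dr then 1 else 0))
        = td - (((k + 1 : Nat) : Int) * dq + min ((k + 1 : Nat) : Int) dr) := by
      push_cast; rw [pvStart_succ (q := dq) (r := dr) k]; ring
    have hsm1 : ((s + 1 : Nat) : Int) - 1 = (s : Int) := by push_cast; ring
    rw [hnewpos, hnewdays, hsm1, ih (k + 1) (by push_cast; push_cast at hks; omega)]
    have hchunk : PySem.List.slice xs (some ((k : Int) * q + min (k : Int) r))
        (some (((k + 1 : Nat) : Int) * q + min ((k + 1 : Nat) : Int) r))
        = pvChunk xs q r k := by
      unfold pvChunk; congr 2; push_cast; rw [pvStart_succ k]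
    rw [hchunk]
    rw [List.range'_succ, List.flatMap_cons]
    simp [List.append_assoc]

theorem pvConcat_flatMap_line (xs : List String) (q r dq dr : Int) : ∀ (m : Nat),
    pvConcat ((List.range m).flatMap
      (fun (t : Nat) => ("Sprint " ++ PySem.Int.toStr ((t : Int) + 1) ++ " - Duración: " ++
          PySem.Int.toStr (dq + (if (t : Int) < dr then 1 else 0)) ++ " día(s)\n")
        :: ((pvChunk xs q r t).map (fun task => "  - " ++ task ++ "\n") ++ ["\n"])))
    = pvConcat ((List.range m).map (pvLine xs q r dq dr)) := by
  intro m
  induction m with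
  | zero => rfl
  | succ m ih =>
    rw [List.range_succ, List.flatMap_append, List.map_append,
      pvConcat_append, pvConcat_append, ih]
    congr 1
    simp only [List.flatMap_cons, List.flatMap_nil, List.append_nil, List.map_cons, List.map_nil]
    rw [pvConcat_cons, pvConcat_append]
    simp [pvLine, pvKey, pvConcat_cons, pvConcat_nil, String.append_empty, String.append_assoc]

-- ===== VERDICT (by name: the statement is the Claim_ definition above) =====
theorem generar_documento_calendario_spec : Claim_equal_generar_documento_calendario := by
  intro instrucciones num_sprints total_days _hDom
  unfold Spec_generar_documento_calendario
  simp only [generar_documento_calendario, generar_documento_calendario_alt]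
  set ns := if num_sprints < 1 then 1 else num_sprints with hns
  have hns1 : 1 ≤ ns := by rw [hns]; split <;> omega
  by_cases hnil : instrucciones = []
  · have hlen : PySem.List.len instrucciones = 0 := by simp [hnil, PySem.List.len]
    rw [if_pos hlen, if_pos hnil]
  · have hlen : ¬ PySem.List.len instrucciones = 0 := by
      simp only [PySem.List.len_eq]
      intro h
      exact hnil (List.length_eq_zero_iff.mp (by exact_mod_cast h))
    rw [if_neg hlen, if_neg hnil]
    set q := PySem.Int.floordiv (PySem.List.len instrucciones) ns with hq
    set r := PySem.Int.mod (PySem.List.len instrucciones) ns with hrdef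
    set dq := PySem.Int.floordiv total_days ns with hdq
    set dr := PySem.Int.mod total_days ns with hdr
    have hnspos : (0 : Int) < ns := by omega
    have hr0 : 0 ≤ r := PySem.Int.mod_nonneg _ hnspos
    have hr1 : r < ns := PySem.Int.mod_lt _ hnspos
    have hdr0 : 0 ≤ dr := PySem.Int.mod_nonneg _ hnspos
    have hdr1 : dr < ns := PySem.Int.mod_lt _ hnspos
    have hn : PySem.List.len instrucciones = q * ns + r := by
      rw [hq, hrdef]; rw [mul_comm]
      have := PySem.Int.floordiv_mul_add_mod (PySem.List.len instrucciones) ns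
      rw [mul_comm] at this
      linarith
    have htd : total_days = dq * ns + dr := by
      rw [hdq, hdr]
      have := PySem.Int.floordiv_mul_add_mod total_days ns
      linarith
    -- A side
    simp only [PySem.List.pyRange_one, Int.sub_zero, zero_add]
    rw [pvLoopA1 instrucciones q r hr0 ns.toNat]
    rw [pvLoopA2 instrucciones q r dq dr ns.toNat ""]
    rw [String.empty_append]
    -- B side
    have hnsInt : ((ns.toNat : Nat) : Int) = ns := Int.toNat_of_nonneg (by omega)
    have h00 : (0 : Int) = ((0 : Nat) : Int) * q + min ((0 : Nat) : Int) r := by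
      simp [min_eq_left hr0]
    have h0d : total_days = total_days - (((0 : Nat) : Int) * dq + min ((0 : Nat) : Int) dr) := by
      simp [min_eq_left hdr0]
    rw [show pvWhileB instrucciones ns [] 0 total_days ns
          = pvWhileB instrucciones ns [] (((0 : Nat) : Int) * q + min ((0 : Nat) : Int) r)
              (total_days - (((0 : Nat) : Int) * dq + min ((0 : Nat) : Int) dr))
              ((ns.toNat : Nat) : Int) by rw [← h00, ← h0d, hnsInt]]
    rw [pvLoopB instrucciones ns q r dq dr total_days hn hr0 hr1 htd hdr0 hdr1 ns.toNat 0
      (by rw [hnsInt]; push_cast; ring) []]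
    rw [List.nil_append, pvJoin_empty]
    rw [show List.range' 0 ns.toNat = List.range ns.toNat from List.range_eq_range'.symm]
    rw [pvConcat_flatMap_line instrucciones q r dq dr ns.toNat]
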